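-- pv_equiv track=rewrite | github.com/Klaudia1303/student_code_analysis | Progetto-tirocinio2024/data/student_data/2085703_Pandolfi/LabPython08/A_Ex3.py | A_Ex3
-- ===== SOURCE A (Python) =====
-- def A_Ex3(l):
--     insieme = set()
--
--     for x in range(len(l)):
--         l2 = []
--         for y in range(len(l)):
--             if len(l[x]) == len(l[y]):
--                 l2.append(l[y])
--         if len(l2) > 1:
--             for a in range(len(l2)-1):
--                 for b in range(a+1, len(l2)):
--                     if l2[a] != l2[b]:
--                         insieme.add((l2[a],l2[b]))
--                         insieme.add((l2[b], l2[a]))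
--
--     return insieme
-- ===== SOURCE B (Python) =====
-- def A_Ex3(l):
--     groups = {}
--     for s in l:
--         groups.setdefault(len(s), []).append(s)
--     insieme = set()
--     for g in groups.values():
--         for i, a in enumerate(g):
--             for b in g[i + 1:]:
--                 if a != b:
--                     insieme.add((a, b))
--                     insieme.add((b, a))
--     return insieme
-- ===== Notes on version B (the rewrite author's own statement) =====
-- stated objective: faster
-- what changed: A rescans the whole list for every element to rebuild that element's length-group and redoes the group's pair double-loop once per element; B builds a length-keyed dict of groups in one pass and runs the distinct-pair double loop exactly once per group.
import Mathlib
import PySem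

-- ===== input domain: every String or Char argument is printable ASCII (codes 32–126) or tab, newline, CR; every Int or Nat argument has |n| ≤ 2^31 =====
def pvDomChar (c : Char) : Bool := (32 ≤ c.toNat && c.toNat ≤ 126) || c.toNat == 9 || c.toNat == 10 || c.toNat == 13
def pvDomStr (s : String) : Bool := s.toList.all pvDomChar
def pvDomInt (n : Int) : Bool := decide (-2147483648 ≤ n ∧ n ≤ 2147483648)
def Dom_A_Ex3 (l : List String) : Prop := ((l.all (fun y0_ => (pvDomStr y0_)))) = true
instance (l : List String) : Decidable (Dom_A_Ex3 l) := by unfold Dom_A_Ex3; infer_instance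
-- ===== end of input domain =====

-- B replaces A's per-element rescans (each element refilters the whole list and redoes its group's
-- double loop) by one grouping pass into a length-keyed dict followed by one pair loop per group.


-- ===== PORT A =====
def A_Ex3 (l : List String) : List (String × String) :=
  (PySem.List.pyRange 0 (PySem.List.len l) 1).foldl (fun ins x =>
    let l2 : List String :=
      (PySem.List.pyRange 0 (PySem.List.len l) 1).foldl (fun l2 y =>
        if PySem.Str.len (PySem.List.pyGetD l x "") = PySem.Str.len (PySem.List.pyGetD l y "") then
          l2 ++ [PySem.List.pyGetD l y ""]
        else l2) []
    if 1 < l2.length then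
      (PySem.List.pyRange 0 (PySem.List.len l2 - 1) 1).foldl (fun ins a =>
        (PySem.List.pyRange (a + 1) (PySem.List.len l2) 1).foldl (fun ins b =>
          if PySem.List.pyGetD l2 a "" ≠ PySem.List.pyGetD l2 b "" then
            PySem.Set.add
              (PySem.Set.add ins (PySem.List.pyGetD l2 a "", PySem.List.pyGetD l2 b ""))
              (PySem.List.pyGetD l2 b "", PySem.List.pyGetD l2 a "")
          else ins) ins) ins
    else ins) PySem.Set.empty

-- ===== PORT B =====
-- 'for i, a in enumerate(g): for b in g[i+1:]: …' = structural recursion: head against its tail.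
def pvPairsAdd : List String → PySem.Set (String × String) → PySem.Set (String × String)
  | [], ins => ins
  | a :: rest, ins =>
      pvPairsAdd rest (rest.foldl (fun t b =>
        if a ≠ b then PySem.Set.add (PySem.Set.add t (a, b)) (b, a) else t) ins)

def A_Ex3_alt (l : List String) : List (String × String) :=
  -- 'groups.setdefault(len(s), []).append(s)'  =  groups[len s] = groups.get(len s, []) ++ [s]
  let groups : PySem.Dict Int (List String) :=
    l.foldl (fun d s => d.modify (PySem.Str.len s) [] (fun g => g ++ [s])) PySem.Dict.empty
  groups.values.foldl (fun ins g => pvPairsAdd g ins) PySem.Set.empty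

-- ===== PRECONDITION & SPEC =====
def Spec_A_Ex3 (l : List String) (out : List (String × String)) : Prop := out = A_Ex3_alt l
instance (l : List String) (out : List (String × String)) : Decidable (Spec_A_Ex3 l out) := by unfold Spec_A_Ex3; infer_instance

-- ===== CLAIM (what is proved, stated in full; the proofs are below) =====
def Claim_equal_A_Ex3 : Prop := ∀ (l : List String), Dom_A_Ex3 l → Spec_A_Ex3 l (A_Ex3 l)

-- ===== LEMMAS AND PROOFS =====

-- the group of elements of l whose length is k, in list order
def pvGrp (l : List String) (k : Int) : List String :=
  l.filter (fun v => PySem.Str.len v == k)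

-- the pairs the double loop over g emits (in whatever order)
def pvEmits : List String → (String × String) → Prop
  | [], _ => False
  | a :: rest, p => (∃ b ∈ rest, a ≠ b ∧ (p = (a, b) ∨ p = (b, a))) ∨ pvEmits rest p

lemma pv_step_mem (a b : String) (t : PySem.Set (String × String)) (p : String × String) :
    p ∈ (if a ≠ b then PySem.Set.add (PySem.Set.add t (a, b)) (b, a) else t) ↔
      p ∈ t ∨ (a ≠ b ∧ (p = (a, b) ∨ p = (b, a))) := by
  split_ifs with h
  · simp [PySem.Set.mem_add, h, or_assoc]
  · simp at h; simp [h]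

lemma pv_mem_inner (a : String) :
    ∀ (rest : List String) (t : PySem.Set (String × String)) (p : String × String),
      p ∈ rest.foldl (fun t b =>
          if a ≠ b then PySem.Set.add (PySem.Set.add t (a, b)) (b, a) else t) t ↔
        p ∈ t ∨ ∃ b ∈ rest, a ≠ b ∧ (p = (a, b) ∨ p = (b, a)) := by
  intro rest
  induction rest with
  | nil => simp
  | cons b bs ih =>
      intro t p
      rw [List.foldl_cons, ih, pv_step_mem, List.exists_mem_cons_iff]
      exact or_assoc

lemma pv_mem_pairsAdd :
    ∀ (g : List String) (t : PySem.Set (String × String)) (p : String × String),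
      p ∈ pvPairsAdd g t ↔ p ∈ t ∨ pvEmits g p := by
  intro g
  induction g with
  | nil => simp [pvPairsAdd, pvEmits]
  | cons a rest ih =>
      intro t p
      rw [show pvPairsAdd (a :: rest) t = pvPairsAdd rest (rest.foldl (fun t b =>
        if a ≠ b then PySem.Set.add (PySem.Set.add t (a, b)) (b, a) else t) t) from rfl]
      rw [ih, pv_mem_inner]
      show _ ↔ p ∈ t ∨ ((∃ b ∈ rest, a ≠ b ∧ (p = (a, b) ∨ p = (b, a))) ∨ pvEmits rest p)
      exact or_assoc

lemma pv_inner_noop (a : String) :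
    ∀ (rest : List String) (t : PySem.Set (String × String)),
      (∀ b, b ∈ rest → a ≠ b → (a, b) ∈ t ∧ (b, a) ∈ t) →
      rest.foldl (fun t b =>
        if a ≠ b then PySem.Set.add (PySem.Set.add t (a, b)) (b, a) else t) t = t := by
  intro rest
  induction rest with
  | nil => intro t _; rfl
  | cons b bs ih =>
      intro t h
      rw [List.foldl_cons]
      by_cases hab : a = b
      · rw [if_neg (by simp [hab])]
        exact ih t (fun c hc => h c (by simp [hc]))
      · have h1 := h b (by simp) hab
        rw [if_pos hab, PySem.Set.add_of_mem h1.1, PySem.Set.add_of_mem h1.2]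
        exact ih t (fun c hc => h c (by simp [hc]))

lemma pv_pairsAdd_noop :
    ∀ (g : List String) (t : PySem.Set (String × String)),
      (∀ p, pvEmits g p → p ∈ t) → pvPairsAdd g t = t := by
  intro g
  induction g with
  | nil => intro t _; rfl
  | cons a rest ih =>
      intro t h
      show pvPairsAdd rest _ = t
      rw [pv_inner_noop a rest t (fun b hb hab =>
        ⟨h _ (Or.inl ⟨b, hb, hab, Or.inl rfl⟩), h _ (Or.inl ⟨b, hb, hab, Or.inr rfl⟩)⟩)]
      exact ih t (fun p hp => h p (Or.inr hp))

-- monotonicity: the fold over keys only grows the set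
lemma pv_mem_foldl_step (l : List String) :
    ∀ (ks : List Int) (s : PySem.Set (String × String)) (p : String × String),
      p ∈ s → p ∈ ks.foldl (fun s k => pvPairsAdd (pvGrp l k) s) s := by
  intro ks
  induction ks with
  | nil => intro s p hp; exact hp
  | cons k ks ih =>
      intro s p hp
      exact ih _ p ((pv_mem_pairsAdd _ _ _).2 (Or.inl hp))

-- after a key has been processed, all its emitted pairs are present
lemma pv_done_foldl_step (l : List String) :
    ∀ (ks : List Int) (s : PySem.Set (String × String)) (k : Int), k ∈ ks →
      ∀ p, pvEmits (pvGrp l k) p → p ∈ ks.foldl (fun s k => pvPairsAdd (pvGrp l k) s) s := by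
  intro ks
  induction ks with
  | nil => intro s k hk; simp at hk
  | cons k' ks ih =>
      intro s k hk p hp
      rcases List.mem_cons.1 hk with rfl | hk
      · exact pv_mem_foldl_step l ks _ p ((pv_mem_pairsAdd _ _ _).2 (Or.inr hp))
      · exact ih _ k hk p hp

-- processing the key list = processing its first-occurrence dedup (repeats are no-ops)
lemma pv_foldl_step_ofList (l : List String) :
    ∀ (ks : List Int) (s : PySem.Set (String × String)),
      ks.foldl (fun s k => pvPairsAdd (pvGrp l k) s) s =
        (PySem.Set.ofList ks).foldl (fun s k => pvPairsAdd (pvGrp l k) s) s := by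
  intro ks
  induction ks using List.reverseRecOn with
  | nil => intro s; rfl
  | append_singleton ks k ih =>
      intro s
      rw [List.foldl_append, PySem.Set.ofList_append_singleton, ih]
      by_cases hk : k ∈ PySem.Set.ofList ks
      · rw [PySem.Set.add_of_mem hk]
        simp only [List.foldl_cons, List.foldl_nil]
        exact pv_pairsAdd_noop _ _
          (pv_done_foldl_step l (PySem.Set.ofList ks) s k hk)
      · rw [PySem.Set.add_of_not_mem hk, List.foldl_append]

-- ---- reduction of port A ----

lemma pv_l2_eq (l : List String) (L : Int) :
    (PySem.List.pyRange 0 (l.length : Int) 1).foldl (fun l2 y =>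
        if L = PySem.Str.len (PySem.List.pyGetD l y "") then
          l2 ++ [PySem.List.pyGetD l y ""]
        else l2) [] = pvGrp l L := by
  rw [PySem.List.foldl_pyRange_zero_pyGetD' l ""
      (fun l2 v => if L = PySem.Str.len v then l2 ++ [v] else l2) []]
  have hfun : (fun (l2 : List String) v => if L = PySem.Str.len v then l2 ++ [v] else l2)
      = (fun l2 v => if (PySem.Str.len v == L) = true then l2 ++ [id v] else l2) := by
    funext l2 v
    by_cases h : L = PySem.Str.len v
    · rw [if_pos h, if_pos (by simp [h])]; rfl
    · rw [if_neg h, if_neg (by simp; exact fun hh => h hh.symm)]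
  rw [hfun, PySem.List.foldl_append_if]
  simp [pvGrp]

-- the Nat-indexed double loop is the structural pair loop
lemma pv_idx_nat :
    ∀ (g : List String) (ins : PySem.Set (String × String)),
      (List.range (g.length - 1)).foldl (fun ins k =>
        (g.drop (k + 1)).foldl (fun ins v =>
          if g.getD k "" ≠ v then
            PySem.Set.add (PySem.Set.add ins (g.getD k "", v)) (v, g.getD k "")
          else ins) ins) ins = pvPairsAdd g ins := by
  intro g
  induction g with
  | nil => intro ins; rfl
  | cons a rest ih =>
      intro ins
      cases rest with
      | nil => simp [pvPairsAdd]
      | cons b bs =>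
          have hlen : (a :: b :: bs).length - 1 = bs.length + 1 := by simp
          rw [hlen, List.range_succ_eq_map, List.foldl_cons]
          simp only [List.getD_cons_zero, List.drop_succ_cons, List.drop_zero, List.foldl_map]
          have hb : ∀ (k : Nat), (a :: b :: bs).getD (k + 1) "" = (b :: bs).getD k "" := by
            intro k; rfl
          have hd : ∀ (k : Nat), (a :: b :: bs).drop (k + 1 + 1) = (b :: bs).drop (k + 1) := by
            intro k; rfl
          simp only [Nat.succ_eq_add_one, hb]
          rw [show pvPairsAdd (a :: b :: bs) ins =
              pvPairsAdd (b :: bs) ((b :: bs).foldl (fun t c =>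
                if a ≠ c then PySem.Set.add (PySem.Set.add t (a, c)) (c, a) else t) ins) from rfl]
          rw [← ih]
          have hl : (b :: bs).length - 1 = bs.length := by simp
          rw [hl]
          apply PySem.List.foldl_congr_mem
          intro acc k _
          rw [List.drop_succ_cons]

-- the inner Int range loop, for a fixed already-fetched left element u
lemma pv_inner_int (g : List String) (u : String) (k : Nat)
    (acc : PySem.Set (String × String)) :
    (PySem.List.pyRange ((k : Int) + 1) (g.length : Int) 1).foldl (fun ins b =>
        if u ≠ PySem.List.pyGetD g b "" then
          PySem.Set.add (PySem.Set.add ins (u, PySem.List.pyGetD g b "")) (PySem.List.pyGetD g b "", u)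
        else ins) acc =
      (g.drop (k + 1)).foldl (fun ins v =>
        if u ≠ v then PySem.Set.add (PySem.Set.add ins (u, v)) (v, u) else ins) acc := by
  rw [PySem.List.foldl_pyRange_pyGetD' g ""
      (fun ins v => if u ≠ v then PySem.Set.add (PySem.Set.add ins (u, v)) (v, u) else ins) acc
      (show (0 : Int) ≤ (k : Int) + 1 by positivity)]
  have : ((k : Int) + 1).toNat = k + 1 := by omega
  rw [this]

-- the Int-indexed double loop of port A, guard included
lemma pv_idx_eq (g : List String) (ins : PySem.Set (String × String)) :
    (if 1 < g.length then
      (PySem.List.pyRange 0 ((g.length : Int) - 1) 1).foldl (fun ins a =>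
        (PySem.List.pyRange (a + 1) (g.length : Int) 1).foldl (fun ins b =>
          if PySem.List.pyGetD g a "" ≠ PySem.List.pyGetD g b "" then
            PySem.Set.add
              (PySem.Set.add ins (PySem.List.pyGetD g a "", PySem.List.pyGetD g b ""))
              (PySem.List.pyGetD g b "", PySem.List.pyGetD g a "")
          else ins) ins) ins
    else ins) = pvPairsAdd g ins := by
  by_cases hg : 1 < g.length
  · rw [if_pos hg, ← pv_idx_nat g ins]
    rw [PySem.List.pyRange_one 0 ((g.length : Int) - 1)]
    have ht : (((g.length : Int) - 1) - 0).toNat = g.length - 1 := by omega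
    rw [ht, List.foldl_map]
    apply PySem.List.foldl_congr_mem
    intro acc k _
    simp only [zero_add, PySem.List.pyGetD_natCast]
    exact pv_inner_int g (g.getD k "") k acc
  · rw [if_neg hg]
    cases g with
    | nil => rfl
    | cons x rest =>
        cases rest with
        | nil => simp [pvPairsAdd]
        | cons y t =>
            exact absurd (show 1 < (x :: y :: t).length by simp [List.length_cons]) hg

lemma pv_A_eq (l : List String) :
    A_Ex3 l = (l.map PySem.Str.len).foldl (fun ins k => pvPairsAdd (pvGrp l k) ins) [] := by
  unfold A_Ex3
  simp only [PySem.List.len_eq]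
  rw [PySem.List.foldl_pyRange_zero_pyGetD' l ""
      (fun ins xv =>
        let l2 : List String :=
          (PySem.List.pyRange 0 (l.length : Int) 1).foldl (fun l2 y =>
            if PySem.Str.len xv = PySem.Str.len (PySem.List.pyGetD l y "") then
              l2 ++ [PySem.List.pyGetD l y ""]
            else l2) []
        if 1 < l2.length then
          (PySem.List.pyRange 0 ((l2.length : Int) - 1) 1).foldl (fun ins a =>
            (PySem.List.pyRange (a + 1) (l2.length : Int) 1).foldl (fun ins b =>
              if PySem.List.pyGetD l2 a "" ≠ PySem.List.pyGetD l2 b "" then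
                PySem.Set.add
                  (PySem.Set.add ins (PySem.List.pyGetD l2 a "", PySem.List.pyGetD l2 b ""))
                  (PySem.List.pyGetD l2 b "", PySem.List.pyGetD l2 a "")
              else ins) ins) ins
        else ins) PySem.Set.empty]
  rw [List.foldl_map]
  apply PySem.List.foldl_congr_mem
  intro acc x _
  simp only [pv_l2_eq]
  exact pv_idx_eq (pvGrp l (PySem.Str.len x)) acc

lemma pv_B_eq (l : List String) :
    A_Ex3_alt l =
      (PySem.Set.ofList (l.map PySem.Str.len)).foldl (fun ins k => pvPairsAdd (pvGrp l k) ins) [] := by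
  show (l.foldl (fun d s => d.modify (PySem.Str.len s) [] (fun g => g ++ [s]))
      PySem.Dict.empty).values.foldl (fun ins g => pvPairsAdd g ins) PySem.Set.empty = _
  set D := l.foldl (fun d s => d.modify (PySem.Str.len s) [] (fun g => g ++ [s]))
      PySem.Dict.empty with hD
  have hnd : D.keys.Nodup := by
    exact PySem.Dict.nodup_keys_foldl_modify_key l PySem.Str.len []
      (fun _ s => fun g => g ++ [s]) PySem.Dict.empty (by simp)
  have hkeys : D.keys = PySem.Set.ofList (l.map PySem.Str.len) := by
    have h := PySem.Dict.keys_foldl_modify_key l PySem.Str.len ([] : List String)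
      (fun _ s => fun g => g ++ [s]) PySem.Dict.empty
    simpa [PySem.Set.update_nil_left] using h
  have hgetD : ∀ k : Int, D.getD k [] = pvGrp l k := by
    intro k
    have h := PySem.Dict.getD_foldl_modify_append (l.map (fun s => (PySem.Str.len s, s)))
      PySem.Dict.empty k
    rw [List.foldl_map] at h
    rw [hD]
    simpa [pvGrp, Function.comp_def, List.filter_map] using h
  rw [PySem.Dict.values_eq_map_keys D hnd [], List.foldl_map, hkeys]
  apply PySem.List.foldl_congr_mem
  intro acc k _
  show pvPairsAdd (D.getD k []) acc = pvPairsAdd (pvGrp l k) acc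
  rw [hgetD k]

-- ===== VERDICT (by name: the statement is the Claim_ definition above) =====
theorem A_Ex3_spec : Claim_equal_A_Ex3 := by
  intro l _
  show A_Ex3 l = A_Ex3_alt l
  rw [pv_A_eq, pv_B_eq, pv_foldl_step_ofList]
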